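-- pv_equiv track=rewrite | github.com/oyvito/fin-table-prep | src/analysis/column_mapping.py | find_duplicate_column_variants
-- ===== SOURCE A (Python) =====
-- def find_duplicate_column_variants(column_name: str, columns: list[str]) -> list[str]:
--     """Finn alle varianter av en kolonne med .1, .2 suffixer."""
--     variants = []
--
--     if column_name in columns:
--         variants.append(column_name)
--
--     i = 1
--     while f"{column_name}.{i}" in columns:
--         variants.append(f"{column_name}.{i}")
--         i += 1
--
--     return variants
-- ===== SOURCE B (Python) =====
-- def find_duplicate_column_variants(column_name: str, columns: list[str]) -> list[str]:
--     """Finn alle varianter av en kolonne med .1, .2 suffixer."""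
--     prefix = column_name + "."
--     plen = len(prefix)
--     base_present = False
--     indices = set()
--     for col in columns:
--         if col == column_name:
--             base_present = True
--             continue
--         if not col.startswith(prefix):
--             continue
--         rest = col[plen:]
--         if not rest or rest[0] == "0":
--             continue
--         value = 0
--         for ch in rest:
--             if ch < "0" or ch > "9":
--                 value = -1
--                 break
--             value = value * 10 + (ord(ch) - 48)
--         if value > 0:
--             indices.add(value)
--     variants = [column_name] if base_present else []
--     run = 0
--     for v in sorted(indices):
--         if v == run + 1:
--             run = v
--         else:
--             break
--     variants.extend(f"{column_name}.{k}" for k in range(1, run + 1))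
--     return variants
-- ===== Notes on version B (the rewrite author's own statement) =====
-- stated objective: alternative
-- what changed: Instead of repeatedly scanning the whole column list for column_name.1, .2, ... (one linear membership test per suffix), B makes a single pass over columns classifying each entry (base name, or a canonical positive-integer suffix validated and parsed char by char), collects the suffix indices in a set, and reads the answer off as the maximal contiguous run starting at 1 in one walk over the sorted indices.
import Mathlib
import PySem

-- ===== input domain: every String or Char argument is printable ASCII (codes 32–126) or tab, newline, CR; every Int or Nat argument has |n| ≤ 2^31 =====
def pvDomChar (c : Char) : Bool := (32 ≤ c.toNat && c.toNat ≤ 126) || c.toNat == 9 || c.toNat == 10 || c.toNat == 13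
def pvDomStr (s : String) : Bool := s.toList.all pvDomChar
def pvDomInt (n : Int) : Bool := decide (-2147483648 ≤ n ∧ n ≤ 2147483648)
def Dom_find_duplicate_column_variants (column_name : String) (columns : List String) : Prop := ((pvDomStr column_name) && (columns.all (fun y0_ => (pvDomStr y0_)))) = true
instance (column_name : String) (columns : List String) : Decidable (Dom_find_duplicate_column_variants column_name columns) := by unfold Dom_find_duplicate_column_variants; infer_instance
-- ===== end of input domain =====

-- B replaces A's repeated whole-list membership probes for "name.1", "name.2", … by one
-- classification pass over the columns (parsing canonical integer suffixes into a set)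
-- followed by one walk over the sorted suffix indices: a different algorithm, same result.

-- ===== PORT A =====
-- f"{column_name}.{i}"
def pvMkA (cn : List Char) (i : Int) : List Char := cn ++ '.' :: PySem.Int.toChars i

-- the 'while f"{column_name}.{i}" in columns' loop; the fuel cols.length + 1 is an upper
-- bound on the iteration count (the loop test can succeed at most cols.length times,
-- proved below), so the loop always stops on a failed test exactly as in Python
def pvLoopA (cn : List Char) (cols : List (List Char)) (fuel : Nat) (i : Int) (acc : List (List Char)) : List (List Char) :=
  match fuel with
  | 0 => acc
  | f + 1 =>
    if pvMkA cn i ∈ cols then pvLoopA cn cols f (i + 1) (acc ++ [pvMkA cn i]) else acc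

def find_duplicate_column_variants (column_name : String) (columns : List String) : List String :=
  let cn := column_name.toList
  let cols := columns.map String.toList
  let variants : List (List Char) := if cn ∈ cols then [cn] else []
  (pvLoopA cn cols (cols.length + 1) 1 variants).map String.ofList

-- ===== PORT B =====
-- the inner 'for ch in rest' validating/parsing loop of Source B (-1 = the break sentinel)
def pvParseB (cs : List Char) (value : Int) : Int :=
  match cs with
  | [] => value
  | ch :: rest =>
    if ch < '0' ∨ '9' < ch then -1
    else pvParseB rest (value * 10 + ((ch.toNat : Int) - 48))

-- one step of Source B's classification loop over columns; state = (base_present, indices)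
def pvClassifyB (cn pfx : List Char) (plen : Int) (st : Bool × PySem.Set Int) (col : List Char) : Bool × PySem.Set Int :=
  if col = cn then (true, st.2)
  else if PySem.Chars.startswith col pfx then
    let rest := PySem.List.slice col (some plen) none
    if rest = [] ∨ PySem.List.pyGet? rest 0 = some '0' then st
    else
      let value := pvParseB rest 0
      if 0 < value then (st.1, PySem.Set.add st.2 value) else st
  else st

-- Source B's 'for v in sorted(indices): if v == run + 1: run = v else: break'
def pvRunB (l : List Int) (run : Int) : Int :=
  match l with
  | [] => run
  | v :: t => if v = run + 1 then pvRunB t v else run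

def find_duplicate_column_variants_alt (column_name : String) (columns : List String) : List String :=
  let cn := column_name.toList
  let pfx := cn ++ ['.']
  let plen := PySem.List.len pfx
  let st := (columns.map String.toList).foldl (pvClassifyB cn pfx plen) (false, PySem.Set.empty)
  let variants : List (List Char) := if st.1 then [cn] else []
  let run := pvRunB (PySem.List.sorted st.2 (fun x => x)) 0
  (variants ++ (PySem.List.pyRange 1 (run + 1)).map (fun k => cn ++ '.' :: PySem.Int.toChars k)).map String.ofList

-- ===== PRECONDITION & SPEC =====
def Spec_find_duplicate_column_variants (column_name : String) (columns : List String) (out : List String) : Prop := out = find_duplicate_column_variants_alt column_name columns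
instance (column_name : String) (columns : List String) (out : List String) : Decidable (Spec_find_duplicate_column_variants column_name columns out) := by unfold Spec_find_duplicate_column_variants; infer_instance

-- ===== CLAIM (what is proved, stated in full; the proofs are below) =====
def Claim_equal_find_duplicate_column_variants : Prop := ∀ (column_name : String) (columns : List String), Dom_find_duplicate_column_variants column_name columns → Spec_find_duplicate_column_variants column_name columns (find_duplicate_column_variants column_name columns)

-- ===== LEMMAS AND PROOFS =====

-- a successful manual parse saw only ASCII digits
theorem pvParseB_pos_digits (cs : List Char) : ∀ (a : Int), 0 < pvParseB cs a →
    ∀ c ∈ cs, '0' ≤ c ∧ c ≤ '9' := by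
  induction cs with
  | nil => intro a _ c hc; cases hc
  | cons ch rest ih =>
    intro a h c hc
    rw [pvParseB] at h
    by_cases hd : ch < '0' ∨ '9' < ch
    · rw [if_pos hd] at h; omega
    · rw [if_neg hd] at h
      rcases List.mem_cons.mp hc with hc | hc
      · subst hc; constructor
        · by_contra hlt; exact hd (Or.inl (lt_of_not_ge fun hh => hlt hh))
        · by_contra hlt; exact hd (Or.inr (lt_of_not_ge fun hh => hlt hh))
      · exact ih _ h c hc

-- the Nat value of a digit string, mirroring pvParseB without the sentinel
def pvValN : List Char → Nat → Nat
  | [], a => a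
  | c :: cs, a => pvValN cs (a * 10 + (c.toNat - 48))

theorem pvParseB_eq_valN (cs : List Char) : ∀ (a : Nat), (∀ c ∈ cs, '0' ≤ c ∧ c ≤ '9') →
    pvParseB cs (a : Int) = (pvValN cs a : Int) := by
  induction cs with
  | nil => intro a _; rfl
  | cons ch rest ih =>
    intro a h
    have hch := h ch (List.mem_cons_self ..)
    have h48 : 48 ≤ ch.toNat := hch.1
    have hnd : ¬ (ch < '0' ∨ '9' < ch) := by
      rintro (hl | hl)
      · exact absurd hch.1 (not_le.mpr hl)
      · exact absurd hch.2 (not_le.mpr hl)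
    rw [pvParseB, if_neg hnd, pvValN]
    have hcast : (a : Int) * 10 + ((ch.toNat : Int) - 48) = ((a * 10 + (ch.toNat - 48) : Nat) : Int) := by
      push_cast [Nat.cast_sub h48]; ring
    rw [hcast]
    exact ih _ (fun c hc => h c (List.mem_cons_of_mem _ hc))

theorem pvValN_snoc (xs : List Char) (c : Char) : ∀ (a : Nat),
    pvValN (xs ++ [c]) a = (pvValN xs a) * 10 + (c.toNat - 48) := by
  induction xs with
  | nil => intro a; rfl
  | cons x xs ih => intro a; simp only [List.cons_append, pvValN, ih]

-- ---- Nat.toDigits structure ----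
theorem pvTDCore_append (f : Nat) : ∀ (n : Nat) (acc : List Char),
    Nat.toDigitsCore 10 f n acc = Nat.toDigitsCore 10 f n [] ++ acc := by
  induction f with
  | zero => intro n acc; rfl
  | succ f ih =>
    intro n acc
    rw [Nat.toDigitsCore, Nat.toDigitsCore]
    by_cases hn : n / 10 = 0
    · simp [hn]
    · rw [if_neg hn, if_neg hn]
      rw [ih (n / 10) ((n % 10).digitChar :: acc), ih (n / 10) [(n % 10).digitChar]]
      simp

theorem pvTDCore_fuel (n : Nat) : ∀ (f f' : Nat) (acc : List Char), n < f → n < f' →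
    Nat.toDigitsCore 10 f n acc = Nat.toDigitsCore 10 f' n acc := by
  induction n using Nat.strong_induction_on with
  | _ n ih =>
    intro f f' acc hf hf'
    match f, f' with
    | g + 1, g' + 1 =>
      rw [Nat.toDigitsCore, Nat.toDigitsCore]
      by_cases hn : n / 10 = 0
      · simp [hn]
      · rw [if_neg hn, if_neg hn]
        exact ih (n / 10) (Nat.div_lt_self (Nat.pos_of_ne_zero (by omega)) (by omega)) g g' _
          (by omega) (by omega)

theorem pvTD_lt (n : Nat) (h : n < 10) : Nat.toDigits 10 n = [Nat.digitChar n] := by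
  rw [Nat.toDigits, Nat.toDigitsCore]
  have hn : n / 10 = 0 := Nat.div_eq_of_lt h
  have hm : n % 10 = n := Nat.mod_eq_of_lt h
  simp [hn, hm]

theorem pvTD_ge (n : Nat) (h : 10 ≤ n) :
    Nat.toDigits 10 n = Nat.toDigits 10 (n / 10) ++ [Nat.digitChar (n % 10)] := by
  have hn : ¬ n / 10 = 0 := by
    have : 10 / 10 ≤ n / 10 := Nat.div_le_div_right h
    simp at this; omega
  rw [Nat.toDigits, Nat.toDigitsCore]
  rw [if_neg hn]
  rw [pvTDCore_append n (n / 10) [(n % 10).digitChar]]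
  rw [pvTDCore_fuel (n / 10) n (n / 10 + 1) []
    (Nat.div_lt_self (by omega) (by omega)) (Nat.lt_succ_self _)]
  rfl

-- ---- digitChar facts ----
theorem pvDC_digit (d : Nat) (h : d < 10) :
    '0' ≤ Nat.digitChar d ∧ Nat.digitChar d ≤ '9' ∧ (Nat.digitChar d).toNat = 48 + d := by
  interval_cases d <;> exact ⟨by decide, by decide, by decide⟩

theorem pvDC_of_char (c : Char) (h0 : '0' ≤ c) (h9 : c ≤ '9') :
    48 ≤ c.toNat ∧ c.toNat ≤ 57 ∧ Nat.digitChar (c.toNat - 48) = c := by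
  have h48 : 48 ≤ c.toNat := h0
  have h57 : c.toNat ≤ 57 := h9
  refine ⟨h48, h57, ?_⟩
  obtain ⟨k, hk, hk2, hkc⟩ : ∃ k, 48 ≤ k ∧ k ≤ 57 ∧ c = Char.ofNat k :=
    ⟨c.toNat, h48, h57, (Char.ofNat_toNat c).symm⟩
  subst hkc
  interval_cases k <;> decide

-- ---- canonical decimal strings of positive naturals ----
theorem pvTD_facts (n : Nat) : 1 ≤ n →
    (∀ c ∈ Nat.toDigits 10 n, '0' ≤ c ∧ c ≤ '9') ∧ Nat.toDigits 10 n ≠ [] ∧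
    (Nat.toDigits 10 n).head? ≠ some '0' ∧ pvValN (Nat.toDigits 10 n) 0 = n := by
  induction n using Nat.strong_induction_on with
  | _ n ih =>
    intro h
    by_cases hlt : n < 10
    · rw [pvTD_lt n hlt]
      obtain ⟨hd0, hd9, hdt⟩ := pvDC_digit n hlt
      refine ⟨?_, by simp, ?_, ?_⟩
      · intro c hc; rw [List.mem_singleton] at hc; subst hc; exact ⟨hd0, hd9⟩
      · simp only [List.head?_cons, ne_eq, Option.some.injEq]
        intro hcontra
        have : (Nat.digitChar n).toNat = 48 := by rw [hcontra]; rfl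
        omega
      · show pvValN [n.digitChar] 0 = n
        rw [pvValN, pvValN]; omega
    · rw [not_lt] at hlt
      have hm : 1 ≤ n / 10 := by omega
      have hmlt : n / 10 < n := Nat.div_lt_self (by omega) (by omega)
      obtain ⟨ihd, ihne, ihhd, ihval⟩ := ih (n / 10) hmlt hm
      obtain ⟨hd0, hd9, hdt⟩ := pvDC_digit (n % 10) (Nat.mod_lt _ (by omega))
      rw [pvTD_ge n hlt]
      refine ⟨?_, by simp [ihne], ?_, ?_⟩
      · intro c hc
        rcases List.mem_append.mp hc with hc | hc
        · exact ihd c hc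
        · rw [List.mem_singleton] at hc; subst hc; exact ⟨hd0, hd9⟩
      · rw [List.head?_append_of_ne_nil _ ihne]
        exact ihhd
      · rw [pvValN_snoc, ihval, hdt]
        omega

theorem pvCanon_eq_td (cs : List Char) : (∀ c ∈ cs, '0' ≤ c ∧ c ≤ '9') → cs ≠ [] →
    cs.head? ≠ some '0' →
    1 ≤ pvValN cs 0 ∧ cs = Nat.toDigits 10 (pvValN cs 0) := by
  induction cs using List.reverseRecOn with
  | nil => intro _ hne _; exact absurd rfl hne
  | append_singleton xs c ihx =>
    intro hd hne hz
    have hc : '0' ≤ c ∧ c ≤ '9' := hd c (by simp)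
    obtain ⟨h48, h57, hdc⟩ := pvDC_of_char c hc.1 hc.2
    rw [pvValN_snoc]
    by_cases hxs : xs = []
    · subst hxs
      simp only [List.nil_append, List.head?_cons, ne_eq, Option.some.injEq] at hz
      have hc48 : c.toNat ≠ 48 := by
        intro hcontra
        apply hz
        have := hdc
        rw [hcontra] at this
        simpa using this.symm
      rw [pvValN]
      constructor
      · omega
      · rw [pvTD_lt _ (by omega), show 0 * 10 + (c.toNat - 48) = c.toNat - 48 by omega, hdc]
        simp
    · have hdx : ∀ c' ∈ xs, '0' ≤ c' ∧ c' ≤ '9' := fun c' hc' => hd c' (by simp [hc'])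
      have hzx : xs.head? ≠ some '0' := by
        rwa [List.head?_append_of_ne_nil _ hxs] at hz
      obtain ⟨ihval, ihtd⟩ := ihx hdx hxs hzx
      have hbig : 10 ≤ pvValN xs 0 * 10 + (c.toNat - 48) := by omega
      constructor
      · omega
      · rw [pvTD_ge _ hbig]
        have hdiv : (pvValN xs 0 * 10 + (c.toNat - 48)) / 10 = pvValN xs 0 := by omega
        have hmod : (pvValN xs 0 * 10 + (c.toNat - 48)) % 10 = c.toNat - 48 := by omega
        rw [hdiv, hmod, hdc, ← ihtd]

-- toChars of a positive Int is toDigits of its Nat value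
theorem pvToChars_pos (v : Int) (h : 1 ≤ v) :
    PySem.Int.toChars v = Nat.toDigits 10 v.toNat := by
  rw [PySem.Int.toChars]
  rw [if_neg (by omega)]

theorem pvMkA_inj (cn : List Char) (v w : Int) (hv : 1 ≤ v) (hw : 1 ≤ w)
    (h : pvMkA cn v = pvMkA cn w) : v = w := by
  rw [pvMkA, pvMkA] at h
  have htc : PySem.Int.toChars v = PySem.Int.toChars w := by
    have := List.append_cancel_left h
    simpa using this
  rw [pvToChars_pos v hv, pvToChars_pos w hw] at htc
  have hval : v.toNat = w.toNat := by
    have h1 := (pvTD_facts v.toNat (by omega)).2.2.2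
    have h2 := (pvTD_facts w.toNat (by omega)).2.2.2
    rw [← h1, ← h2, htc]
  omega

-- ---- canonical suffixes vs toChars ----
theorem pvSuffix_canon (v : Int) (hv : 1 ≤ v) :
    PySem.Int.toChars v ≠ [] ∧ (PySem.Int.toChars v).head? ≠ some '0' ∧
    (∀ c ∈ PySem.Int.toChars v, '0' ≤ c ∧ c ≤ '9') ∧ pvParseB (PySem.Int.toChars v) 0 = v := by
  rw [pvToChars_pos v hv]
  obtain ⟨hd, hne, hhd, hval⟩ := pvTD_facts v.toNat (by omega)
  refine ⟨hne, hhd, hd, ?_⟩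
  have := pvParseB_eq_valN (Nat.toDigits 10 v.toNat) 0 hd
  rw [Nat.cast_zero] at this
  rw [this, hval]
  omega

theorem pvGuard_val (t : List Char) (htne : t ≠ []) (hz : t.head? ≠ some '0')
    (hpos : 0 < pvParseB t 0) :
    1 ≤ pvParseB t 0 ∧ t = PySem.Int.toChars (pvParseB t 0) := by
  have hd := pvParseB_pos_digits t 0 hpos
  have hbr := pvParseB_eq_valN t 0 hd
  rw [Nat.cast_zero] at hbr
  obtain ⟨hval1, htd⟩ := pvCanon_eq_td t hd htne hz
  constructor
  · omega
  · rw [pvToChars_pos _ (by omega)]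
    rw [hbr]
    rw [show ((pvValN t 0 : Int)).toNat = pvValN t 0 by omega]
    exact htd

theorem pvMkA_pfx (cn : List Char) (v : Int) :
    pvMkA cn v = (cn ++ ['.']) ++ PySem.Int.toChars v := by
  simp [pvMkA]

theorem pvRest_eq (cn col t : List Char) (h : col = (cn ++ ['.']) ++ t) :
    PySem.List.slice col (some (PySem.List.len (cn ++ ['.']))) none = t := by
  have hlen : PySem.List.len (cn ++ ['.']) = ((cn ++ ['.']).length : Int) := by
    simp [PySem.List.len_eq]
  rw [hlen, PySem.List.slice_from _ (by positivity)]
  rw [h, Int.toNat_natCast, List.drop_left]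

-- ---- classification pass ----
theorem pvClassifyB_fst (cn : List Char) (st : Bool × PySem.Set Int) (col : List Char) :
    (pvClassifyB cn (cn ++ ['.']) (PySem.List.len (cn ++ ['.'])) st col).1
      = (st.1 || decide (col = cn)) := by
  rw [pvClassifyB]
  by_cases h1 : col = cn
  · simp [h1]
  · simp only [if_neg h1, decide_eq_false h1, Bool.or_false]
    by_cases h2 : PySem.Chars.startswith col (cn ++ ['.'])
    · rw [if_pos h2]
      split_ifs <;> rfl
    · rw [if_neg h2]

theorem pvMk_ne_cn (cn col : List Char) (w : Int) (hw : col = pvMkA cn w) : col ≠ cn := by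
  intro hcontra
  rw [hcontra, pvMkA] at hw
  have := congrArg List.length hw
  simp at this

theorem pvClassifyB_mem (cn : List Char) (st : Bool × PySem.Set Int) (col : List Char) (v : Int) :
    v ∈ (pvClassifyB cn (cn ++ ['.']) (PySem.List.len (cn ++ ['.'])) st col).2
      ↔ v ∈ st.2 ∨ (1 ≤ v ∧ col = pvMkA cn v) := by
  rw [pvClassifyB]
  by_cases h1 : col = cn
  · rw [if_pos h1]
    constructor
    · intro hv; exact Or.inl hv
    · rintro (hv | ⟨hv1, hveq⟩)
      · exact hv
      · exact absurd h1 (pvMk_ne_cn cn col v hveq)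
  · rw [if_neg h1]
    by_cases h2 : PySem.Chars.startswith col (cn ++ ['.'])
    · rw [if_pos h2]
      obtain ⟨t, ht⟩ : ∃ t, col = (cn ++ ['.']) ++ t := by
        obtain ⟨t, ht⟩ := (PySem.Chars.startswith_iff col (cn ++ ['.'])).mp h2
        exact ⟨t, ht.symm⟩
      have hmk_t : ∀ w : Int, 1 ≤ w → col = pvMkA cn w → t = PySem.Int.toChars w := by
        intro w _ hw
        rw [pvMkA_pfx] at hw
        exact List.append_cancel_left (ht.symm.trans hw)
      simp only [pvRest_eq cn col t ht]
      by_cases h3 : t = [] ∨ PySem.List.pyGet? t 0 = some '0'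
      · rw [if_pos h3]
        constructor
        · intro hv; exact Or.inl hv
        · rintro (hv | ⟨hv1, hveq⟩)
          · exact hv
          · exfalso
            have hteq := hmk_t v hv1 hveq
            obtain ⟨hne, hhd, _, _⟩ := pvSuffix_canon v hv1
            rcases h3 with h3 | h3
            · exact hne (hteq.symm.trans h3)
            · rw [hteq] at h3
              rw [PySem.List.pyGet?_zero] at h3
              apply hhd
              rcases hx : PySem.Int.toChars v with _ | ⟨c, cs⟩
              · exact absurd hx hne
              · rw [hx] at h3; simp at h3; simp [h3]
      · rw [if_neg h3]
        have htne : t ≠ [] := fun hx => h3 (Or.inl hx)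
        have hhz : t.head? ≠ some '0' := by
          intro hx
          apply h3
          right
          rw [PySem.List.pyGet?_zero]
          rcases t with _ | ⟨c, cs⟩
          · exact absurd rfl htne
          · simpa using hx
        by_cases h4 : 0 < pvParseB t 0
        · rw [if_pos h4]
          obtain ⟨hval1, hteq⟩ := pvGuard_val t htne hhz h4
          rw [PySem.Set.mem_add]
          constructor
          · rintro (hv | rfl)
            · exact Or.inl hv
            · exact Or.inr ⟨hval1, by rw [ht, pvMkA_pfx]; exact congrArg (fun l => cn ++ ['.'] ++ l) hteq⟩
          · rintro (hv | ⟨hv1, hveq⟩)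
            · exact Or.inl hv
            · right
              apply pvMkA_inj cn v (pvParseB t 0) hv1 hval1
              rw [← hveq, ht, pvMkA_pfx, ← hteq]
        · rw [if_neg h4]
          constructor
          · intro hv; exact Or.inl hv
          · rintro (hv | ⟨hv1, hveq⟩)
            · exact hv
            · exfalso
              have hteq := hmk_t v hv1 hveq
              obtain ⟨_, _, _, hparse⟩ := pvSuffix_canon v hv1
              rw [← hteq] at hparse
              omega
    · rw [if_neg h2]
      constructor
      · intro hv; exact Or.inl hv
      · rintro (hv | ⟨hv1, hveq⟩)
        · exact hv
        · exfalso
          apply h2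
          rw [(PySem.Chars.startswith_iff col (cn ++ ['.']))]
          exact ⟨PySem.Int.toChars v, by rw [hveq, pvMkA_pfx]⟩

theorem pvClassifyB_nodup (cn : List Char) (st : Bool × PySem.Set Int) (col : List Char)
    (h : st.2.Nodup) :
    (pvClassifyB cn (cn ++ ['.']) (PySem.List.len (cn ++ ['.'])) st col).2.Nodup := by
  rw [pvClassifyB]
  by_cases h1 : col = cn
  · simpa [h1] using h
  · rw [if_neg h1]
    by_cases h2 : PySem.Chars.startswith col (cn ++ ['.'])
    · rw [if_pos h2]
      simp only []
      split_ifs with h3 h4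
      · exact h
      · exact PySem.Set.nodup_add _ _ h
      · exact h
    · rwa [if_neg h2]

theorem pvFold_fst (cn : List Char) (cols : List (List Char)) : ∀ (st : Bool × PySem.Set Int),
    (cols.foldl (pvClassifyB cn (cn ++ ['.']) (PySem.List.len (cn ++ ['.']))) st).1
      = (st.1 || decide (cn ∈ cols)) := by
  induction cols with
  | nil => intro st; simp
  | cons col cols ih =>
    intro st
    rw [List.foldl_cons, ih, pvClassifyB_fst]
    have h : decide (cn ∈ col :: cols) = (decide (col = cn) || decide (cn ∈ cols)) := by
      rcases Decidable.em (col = cn) with hc | hc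
      · subst hc; simp
      · rcases Decidable.em (cn ∈ cols) with hm | hm
        · simp [hm]
        · have hnc : ¬ cn ∈ col :: cols := by
            rw [List.mem_cons]
            rintro (h | h)
            · exact hc h.symm
            · exact hm h
          simp [hnc, hc, hm]
    rw [h, Bool.or_assoc]

theorem pvFold_mem (cn : List Char) (cols : List (List Char)) :
    ∀ (st : Bool × PySem.Set Int) (v : Int),
    (v ∈ (cols.foldl (pvClassifyB cn (cn ++ ['.']) (PySem.List.len (cn ++ ['.']))) st).2
      ↔ v ∈ st.2 ∨ (1 ≤ v ∧ pvMkA cn v ∈ cols)) := by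
  induction cols with
  | nil => intro st v; simp
  | cons col cols ih =>
    intro st v
    rw [List.foldl_cons, ih, pvClassifyB_mem]
    constructor
    · rintro ((hv | ⟨hv1, hveq⟩) | ⟨hv1, hvm⟩)
      · exact Or.inl hv
      · exact Or.inr ⟨hv1, by rw [← hveq]; exact List.mem_cons_self ..⟩
      · exact Or.inr ⟨hv1, List.mem_cons_of_mem _ hvm⟩
    · rintro (hv | ⟨hv1, hvm⟩)
      · exact Or.inl (Or.inl hv)
      · rcases List.mem_cons.mp hvm with hvm | hvm
        · exact Or.inl (Or.inr ⟨hv1, hvm.symm⟩)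
        · exact Or.inr ⟨hv1, hvm⟩

theorem pvFold_nodup (cn : List Char) (cols : List (List Char)) :
    ∀ (st : Bool × PySem.Set Int), st.2.Nodup →
    (cols.foldl (pvClassifyB cn (cn ++ ['.']) (PySem.List.len (cn ++ ['.']))) st).2.Nodup := by
  induction cols with
  | nil => intro st h; exact h
  | cons col cols ih =>
    intro st h
    rw [List.foldl_cons]
    exact ih _ (pvClassifyB_nodup cn st col h)

-- ---- the run walk ----
theorem pvRunB_spec (l : List Int) : ∀ (run : Int), l.Pairwise (· < ·) → (∀ x ∈ l, run < x) →
    run ≤ pvRunB l run ∧ (∀ k, run < k → k ≤ pvRunB l run → k ∈ l) ∧ (pvRunB l run + 1) ∉ l := by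
  induction l with
  | nil =>
    intro run _ _
    refine ⟨le_refl _, fun k h1 h2 => absurd (lt_of_lt_of_le h1 h2) (lt_irrefl _), by simp⟩
  | cons v t ih =>
    intro run hp hall
    have hpt : t.Pairwise (· < ·) := (List.pairwise_cons.mp hp).2
    have hvt : ∀ x ∈ t, v < x := (List.pairwise_cons.mp hp).1
    have hrv : run < v := hall v (List.mem_cons_self ..)
    rw [pvRunB]
    by_cases hv : v = run + 1
    · rw [if_pos hv]
      obtain ⟨hle, hmem, hnot⟩ := ih v hpt hvt
      refine ⟨by omega, ?_, ?_⟩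
      · intro k hk1 hk2
        by_cases hkv : k ≤ v
        · have : k = v := by omega
          subst this; exact List.mem_cons_self ..
        · exact List.mem_cons_of_mem _ (hmem k (by omega) hk2)
      · intro hcontra
        rcases List.mem_cons.mp hcontra with hc | hc
        · omega
        · exact hnot hc
    · rw [if_neg hv]
      refine ⟨le_refl _, fun k h1 h2 => absurd (lt_of_lt_of_le h1 h2) (lt_irrefl _), ?_⟩
      intro hcontra
      rcases List.mem_cons.mp hcontra with hc | hc
      · exact hv hc.symm
      · have := hvt _ hc
        omega

-- ---- A's while loop ----
theorem pvLoopA_spec (cn : List Char) (cols : List (List Char)) :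
    ∀ (t : Nat) (fuel : Nat) (i : Int) (acc : List (List Char)), t < fuel →
    (∀ j : Nat, j < t → pvMkA cn (i + (j : Int)) ∈ cols) → pvMkA cn (i + (t : Int)) ∉ cols →
    pvLoopA cn cols fuel i acc
      = acc ++ (List.range t).map (fun (j : Nat) => pvMkA cn (i + (j : Int))) := by
  intro t
  induction t with
  | zero =>
    intro fuel i acc hf _ hstop
    match fuel, hf with
    | f + 1, _ =>
      rw [pvLoopA, if_neg (by simpa using hstop)]
      simp
  | succ t ih =>
    intro fuel i acc hf hsucc hstop
    match fuel, hf with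
    | f + 1, _ =>
      rw [pvLoopA, if_pos (by simpa using hsucc 0 (by omega))]
      rw [ih f (i + 1) (acc ++ [pvMkA cn i]) (by omega)
        (fun j hj => by
          have := hsucc (j + 1) (by omega)
          rw [show i + 1 + (j : Int) = i + ((j : Nat) + 1 : Nat) by push_cast; ring]
          exact this)
        (by
          rw [show i + 1 + (t : Int) = i + ((t : Nat) + 1 : Nat) by push_cast; ring]
          exact hstop)]
      rw [List.range_succ_eq_map, List.map_cons, List.map_map, List.append_assoc,
        List.singleton_append]
      congr 1
      congr 1
      · congr 1
        simp
      · apply List.map_congr_left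
        intro j _
        simp only [Function.comp_apply]
        congr 1
        push_cast
        ring

-- the loop test fails for some t ≤ cols.length (pigeonhole on distinct variant names)
theorem pvLoopA_stops (cn : List Char) (cols : List (List Char)) :
    ∃ t : Nat, t ≤ cols.length ∧ pvMkA cn (1 + (t : Int)) ∉ cols := by
  by_contra hcon
  have hall : ∀ t : Nat, t ≤ cols.length → pvMkA cn (1 + (t : Int)) ∈ cols := by
    intro t ht
    by_contra hnm
    exact hcon ⟨t, ht, hnm⟩
  set l := (List.range (cols.length + 1)).map (fun (j : Nat) => pvMkA cn (1 + (j : Int))) with hl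
  have hnd : l.Nodup := by
    refine List.Nodup.map_on ?_ (List.nodup_range)
    intro x _ y _ hxy
    have := pvMkA_inj cn (1 + (x : Int)) (1 + (y : Int)) (by omega) (by omega) hxy
    omega
  have hsub : ∀ x ∈ l, x ∈ cols := by
    intro x hx
    rw [hl, List.mem_map] at hx
    obtain ⟨j, hj, rfl⟩ := hx
    rw [List.mem_range] at hj
    exact hall j (by omega)
  have h1 : l.toFinset.card = l.length := List.toFinset_card_of_nodup hnd
  have h2 : l.toFinset ⊆ cols.toFinset := by
    intro x hx
    rw [List.mem_toFinset] at hx ⊢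
    exact hsub x hx
  have h3 : l.toFinset.card ≤ cols.toFinset.card := Finset.card_le_card h2
  have h4 : cols.toFinset.card ≤ cols.length := cols.toFinset_card_le
  have h5 : l.length = cols.length + 1 := by simp [hl]
  omega

theorem pvPyRange_one (r : Nat) :
    PySem.List.pyRange 1 ((r : Int) + 1) = (List.range r).map (fun (j : Nat) => 1 + (j : Int)) := by
  induction r with
  | zero => rw [Nat.cast_zero, zero_add]; decide
  | succ r ih =>
    rw [show ((r + 1 : Nat) : Int) + 1 = ((r : Int) + 1) + 1 by push_cast; ring]
    rw [PySem.List.pyRange_one_succ_right (by omega), ih, List.range_succ]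
    simp [add_comm]

-- the two pipelines agree on the char-list level
theorem pvMain (cn : List Char) (cols : List (List Char)) :
    pvLoopA cn cols (cols.length + 1) 1 (if cn ∈ cols then [cn] else [])
      = (if (cols.foldl (pvClassifyB cn (cn ++ ['.']) (PySem.List.len (cn ++ ['.'])))
            (false, PySem.Set.empty)).1 then [cn] else [])
        ++ (PySem.List.pyRange 1 (pvRunB (PySem.List.sorted ((cols.foldl
              (pvClassifyB cn (cn ++ ['.']) (PySem.List.len (cn ++ ['.'])))
              (false, PySem.Set.empty)).2) (fun x => x)) 0 + 1)).map
            (fun k => cn ++ '.' :: PySem.Int.toChars k) := by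
  set st := cols.foldl (pvClassifyB cn (cn ++ ['.']) (PySem.List.len (cn ++ ['.'])))
    (false, PySem.Set.empty) with hst
  have hnd : st.2.Nodup := pvFold_nodup cn cols _ List.nodup_nil
  have hmem : ∀ v : Int, v ∈ st.2 ↔ 1 ≤ v ∧ pvMkA cn v ∈ cols := by
    intro v
    rw [hst, pvFold_mem]
    simp [PySem.Set.empty]
  have hfst : st.1 = decide (cn ∈ cols) := by rw [hst, pvFold_fst]; simp
  set l := PySem.List.sorted st.2 (fun x => x) with hldef
  have hlperm : l.Perm st.2 := PySem.List.sorted_perm st.2 (fun x => x) false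
  have hlmem : ∀ v : Int, v ∈ l ↔ 1 ≤ v ∧ pvMkA cn v ∈ cols := by
    intro v
    rw [hldef, PySem.List.mem_sorted]
    exact hmem v
  have hlnd : l.Nodup := hlperm.nodup_iff.mpr hnd
  have hlle : l.Pairwise (· ≤ ·) := PySem.List.sorted_pairwise st.2 (fun x => x)
  have hlt : l.Pairwise (· < ·) := by
    have := List.Pairwise.and hlle (List.nodup_iff_pairwise_ne.mp hlnd)
    exact this.imp (fun {a b} h => lt_of_le_of_ne h.1 h.2)
  set r := pvRunB l 0 with hr
  obtain ⟨hr0, hrmem, hrnot⟩ := pvRunB_spec l 0 hlt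
    (fun x hx => by have := ((hlmem x).mp hx).1; omega)
  have hP : ∀ k : Int, 1 ≤ k → k ≤ r → pvMkA cn k ∈ cols :=
    fun k h1 h2 => ((hlmem k).mp (hrmem k (by omega) h2)).2
  have hnP : pvMkA cn (r + 1) ∉ cols :=
    fun hc => hrnot ((hlmem (r + 1)).mpr ⟨by omega, hc⟩)
  obtain ⟨t0, ht0le, ht0not⟩ := pvLoopA_stops cn cols
  have hex : ∃ t : Nat, pvMkA cn (1 + (t : Int)) ∉ cols := ⟨t0, ht0not⟩
  set rA := Nat.find hex with hrA
  have hAnot : pvMkA cn (1 + (rA : Int)) ∉ cols := Nat.find_spec hex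
  have hAmin : ∀ j : Nat, j < rA → pvMkA cn (1 + (j : Int)) ∈ cols :=
    fun j hj => not_not.mp (Nat.find_min hex hj)
  have hrange : rA ≤ cols.length := le_trans (Nat.find_min' hex ht0not) ht0le
  have hreq : r = (rA : Int) := by
    rcases lt_trichotomy r ((rA : Int)) with h | h | h
    · exfalso
      have hj : r.toNat < rA := by omega
      have := hAmin r.toNat hj
      rw [show (1 + (r.toNat : Int)) = r + 1 by omega] at this
      exact hnP this
    · exact h
    · exfalso
      have hk := hP ((rA : Int) + 1) (by omega) (by omega)
      rw [show ((rA : Int) + 1) = 1 + (rA : Int) by ring] at hk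
      exact hAnot hk
  rw [pvLoopA_spec cn cols rA (cols.length + 1) 1 (if cn ∈ cols then [cn] else [])
    (by omega) (fun j hj => hAmin j hj) hAnot]
  congr 1
  · rw [hfst]
    by_cases hc : cn ∈ cols <;> simp [hc]
  · rw [hreq, pvPyRange_one rA, List.map_map]
    rfl

-- ===== VERDICT (by name: the statement is the Claim_ definition above) =====
theorem find_duplicate_column_variants_spec : Claim_equal_find_duplicate_column_variants := by
  unfold Claim_equal_find_duplicate_column_variants
  intro column_name columns _
  unfold Spec_find_duplicate_column_variants
  unfold find_duplicate_column_variants find_duplicate_column_variants_alt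
  simp only [List.length_map]
  exact congrArg (List.map String.ofList)
    (by simpa using pvMain column_name.toList (columns.map String.toList))
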